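-- pv_equiv track=rewrite | github.com/erastovaa/python | biletik.py | get_nearest_happy_ticket
-- ===== SOURCE A (Python) =====
-- def sum1(num):
--     sum1 = 0
--     for i in range(0, 3):
--         sum1 += num[i]
--     return sum1
--
-- def sum2(num):
--     sum2 = 0
--     for i in range(3, 6):
--         sum2 += num[i]
--     return sum2
--
-- def get_nearest_happy_ticket(current_ticket: str) -> str:
--     num = [int(i) for i in current_ticket]
--     diff = sum1(num) - sum2(num)
--     if diff == 0:
--         return current_ticket
--     else:
--         diff = 1
--         ticket_up = int(current_ticket)
--         while diff != 0:
--             ticket_up += 1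
--             num = [int(i) for i in str(ticket_up)]
--             diff = sum1(num) - sum2(num)
--         diff = 1
--         ticket_down = int(current_ticket)
--         while diff != 0:
--             if current_ticket == '100000':
--                 current_ticket = '100001'
--                 return current_ticket
--             ticket_down -= 1
--             num = [int(i) for i in str(ticket_down)]
--             diff = sum1(num) - sum2(num)
--         if (abs(int(current_ticket) - ticket_up)
--                 > abs(int(current_ticket) - ticket_down)):
--             return str(ticket_down)
--         else:
--             return str(ticket_up)
-- ===== SOURCE B (Python) =====
-- # B: single expanding search instead of A's two full directional scans plus a
-- # distance comparison; checks base+d before base-d so ties resolve upward like A.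
-- def _balanced(num):
--     return num[0] + num[1] + num[2] == num[3] + num[4] + num[5]
--
-- def _happy(n):
--     return _balanced([int(c) for c in str(n)])
--
-- def get_nearest_happy_ticket(current_ticket: str) -> str:
--     if _balanced([int(c) for c in current_ticket]):
--         return current_ticket
--     base = int(current_ticket)
--     d = 1
--     while True:
--         if _happy(base + d):
--             return str(base + d)
--         if _happy(base - d):
--             return str(base - d)
--         d += 1
-- ===== Notes on version B (the rewrite author's own statement) =====
-- stated objective: alternative
-- what changed: A runs two separate unbounded scans (one fully upward, one fully downward) and then compares the two distances; B does a single expanding search that tests base+d then base-d for d=1,2,..., so the first hit is the answer (testing +d first reproduces A's upward tie-breaking and A's special '100000' case falls out naturally).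
import Mathlib
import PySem

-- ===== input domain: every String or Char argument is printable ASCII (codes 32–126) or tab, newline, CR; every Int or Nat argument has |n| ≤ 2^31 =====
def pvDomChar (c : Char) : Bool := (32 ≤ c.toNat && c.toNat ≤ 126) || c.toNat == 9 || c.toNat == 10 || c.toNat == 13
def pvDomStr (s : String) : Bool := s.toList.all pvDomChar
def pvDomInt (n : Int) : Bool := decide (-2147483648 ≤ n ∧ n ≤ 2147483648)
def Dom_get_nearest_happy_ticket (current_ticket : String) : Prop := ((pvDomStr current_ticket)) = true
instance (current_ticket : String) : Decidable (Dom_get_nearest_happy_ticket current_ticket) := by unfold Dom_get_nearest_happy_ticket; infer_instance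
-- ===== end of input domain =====

-- B replaces A's two full directional while-loops plus a final distance comparison by a single
-- expanding search (test base+d, then base-d, for d = 1, 2, …); return value only.

-- ===== PORT A =====
def pvParse (cs : List Char) : Option (List Int) :=
  cs.mapM (fun c => PySem.Int.ofChars? [c])
def pvSum1 (num : List Int) : Option Int :=
  (PySem.List.pyRange 0 3 1).foldl
    (fun acc i => acc.bind (fun a => (PySem.List.pyGet? num i).map (fun d => a + d))) (some 0)
def pvSum2 (num : List Int) : Option Int :=
  (PySem.List.pyRange 3 6 1).foldl
    (fun acc i => acc.bind (fun a => (PySem.List.pyGet? num i).map (fun d => a + d))) (some 0)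
def pvDiffA (t : Int) : Option Int :=
  (pvParse (PySem.Int.toChars t)).bind fun num =>
    (pvSum1 num).bind fun s1 => (pvSum2 num).map fun s2 => s1 - s2

def pvFuel (n : Int) : Nat := 1000000 + 20 * n.natAbs

def pvUpA (t : Int) : Nat → Option Int
  | 0 => none
  | f+1 =>
    match pvDiffA (t + 1) with
    | none => none
    | some d => if d = 0 then some (t + 1) else pvUpA (t + 1) f

def pvDownA (s : String) (t : Int) : Nat → Option (String ⊕ Int)
  | 0 => none
  | f+1 =>
    if s = "100000" then some (Sum.inl "100001")
    else
      match pvDiffA (t - 1) with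
      | none => none
      | some d => if d = 0 then some (Sum.inr (t - 1)) else pvDownA s (t - 1) f

def get_nearest_happy_ticket (current_ticket : String) : String :=
  match pvParse current_ticket.toList with
  | none => ""
  | some num =>
    match (pvSum1 num).bind (fun s1 => (pvSum2 num).map (fun s2 => s1 - s2)) with
    | none => ""
    | some diff =>
      if diff = 0 then current_ticket
      else
        match PySem.Int.ofStr? current_ticket with
        | none => ""
        | some n =>
          match pvUpA n (pvFuel n) with
          | none => ""
          | some up =>
            match pvDownA current_ticket n (pvFuel n) with
            | none => ""
            | some (Sum.inl r) => r
            | some (Sum.inr down) =>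
              if (n - up).natAbs > (n - down).natAbs
              then PySem.Int.toStr down else PySem.Int.toStr up


-- ===== PORT B =====
def pvBal (num : List Int) : Option Bool :=
  (PySem.List.pyGet? num 0).bind fun a =>
  (PySem.List.pyGet? num 1).bind fun b =>
  (PySem.List.pyGet? num 2).bind fun c =>
  (PySem.List.pyGet? num 3).bind fun d =>
  (PySem.List.pyGet? num 4).bind fun e =>
  (PySem.List.pyGet? num 5).map fun f => a + b + c == d + e + f

def pvHappyB (t : Int) : Option Bool :=
  (pvParse (PySem.Int.toChars t)).bind pvBal

def pvExpandB (n d : Int) : Nat → String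
  | 0 => ""
  | f+1 =>
    match pvHappyB (n + d) with
    | none => ""
    | some true => PySem.Int.toStr (n + d)
    | some false =>
      match pvHappyB (n - d) with
      | none => ""
      | some true => PySem.Int.toStr (n - d)
      | some false => pvExpandB n (d + 1) f

def get_nearest_happy_ticket_alt (current_ticket : String) : String :=
  match pvParse current_ticket.toList with
  | none => ""
  | some num =>
    match pvBal num with
    | none => ""
    | some true => current_ticket
    | some false =>
      match PySem.Int.ofStr? current_ticket with
      | none => ""
      | some n => pvExpandB n 1 (pvFuel n)


-- ===== PRECONDITION & SPEC =====
def pvCodeSum (l : List Char) : Int := (l.map fun c => ((c.toNat : Int))).sum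

-- Pre_ is exactly the set of inputs on which the Python A returns normally: A raises
-- ValueError on any non-digit character, IndexError when the string has fewer than six
-- characters, and IndexError inside its search loops when the string is an unbalanced
-- leading-zero numeral whose value is below 100002 (str() of the searched values then
-- has fewer than six digits).  The three admitted cases: the first three character codes
-- sum to the same value as the next three (A returns at once), the special-cased string
-- '100000', or the numeral's value is at least 100002 (both searches then terminate).
def Pre_get_nearest_happy_ticket (current_ticket : String) : Prop :=
  current_ticket.toList.all Char.isDigit = true ∧ 6 ≤ current_ticket.toList.length ∧
  (pvCodeSum (current_ticket.toList.take 3) = pvCodeSum ((current_ticket.toList.drop 3).take 3)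
    ∨ current_ticket = "100000"
    ∨ (PySem.Int.ofStr? current_ticket).any (fun n => decide (100002 ≤ n)) = true)

-- the special-cased input '100000'
instance (current_ticket : String) : Decidable (Pre_get_nearest_happy_ticket current_ticket) := by
  unfold Pre_get_nearest_happy_ticket; infer_instance

def pvWitness_get_nearest_happy_ticket : String := "123456"

def Spec_get_nearest_happy_ticket (current_ticket : String) (out : String) : Prop :=
  out = get_nearest_happy_ticket_alt current_ticket
instance (current_ticket : String) (out : String) : Decidable (Spec_get_nearest_happy_ticket current_ticket out) := by
  unfold Spec_get_nearest_happy_ticket; infer_instance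

-- ===== CLAIM (what is proved, stated in full; the proofs are below) =====
def Claim_equal_get_nearest_happy_ticket : Prop := ∀ (current_ticket : String), Dom_get_nearest_happy_ticket current_ticket → Pre_get_nearest_happy_ticket current_ticket → Spec_get_nearest_happy_ticket current_ticket (get_nearest_happy_ticket current_ticket)

-- ===== LEMMAS AND PROOFS =====
theorem pvBal_eq (num : List Int) :
    pvBal num = ((pvSum1 num).bind (fun s1 => (pvSum2 num).map (fun s2 => s1 - s2))).map
      (fun d => d == 0) := by
  have hr1 : PySem.List.pyRange 0 3 1 = [0,1,2] := by decide
  have hr2 : PySem.List.pyRange 3 6 1 = [3,4,5] := by decide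
  unfold pvBal pvSum1 pvSum2
  rw [hr1, hr2]
  simp only [List.foldl]
  rcases h0 : PySem.List.pyGet? num 0 with _ | a <;>
  rcases h1 : PySem.List.pyGet? num 1 with _ | b <;>
  rcases h2 : PySem.List.pyGet? num 2 with _ | c <;>
  rcases h3 : PySem.List.pyGet? num 3 with _ | d <;>
  rcases h4 : PySem.List.pyGet? num 4 with _ | e <;>
  rcases h5 : PySem.List.pyGet? num 5 with _ | f <;>
  simp [Option.bind, sub_eq_zero]

theorem pvOfChars_digit (c : Char) (h : c.isDigit = true) :
    PySem.Int.ofChars? [c] = some ((c.toNat : Int) - 48) := by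
  have hb : 48 ≤ c.toNat ∧ c.toNat ≤ 57 := by
    simp [Char.isDigit] at h
    exact ⟨h.1, h.2⟩
  have hoc := Char.ofNat_toNat c
  have : c.toNat = 48 ∨ c.toNat = 49 ∨ c.toNat = 50 ∨ c.toNat = 51 ∨ c.toNat = 52 ∨
      c.toNat = 53 ∨ c.toNat = 54 ∨ c.toNat = 55 ∨ c.toNat = 56 ∨ c.toNat = 57 := by omega
  rcases this with h|h|h|h|h|h|h|h|h|h <;>
    (rw [h] at hoc; rw [← hoc]; decide)

theorem pvParse_digits (l : List Char) (h : ∀ c ∈ l, c.isDigit = true) :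
    pvParse l = some (l.map fun c => (c.toNat : Int) - 48) := by
  induction l with
  | nil => rfl
  | cons c cs ih =>
    unfold pvParse
    rw [List.mapM_cons, pvOfChars_digit c (h c (List.mem_cons_self))]
    have := ih (fun x hx => h x (List.mem_cons_of_mem _ hx))
    unfold pvParse at this
    rw [this]
    rfl

theorem pvOfChars_digitChar (d : Nat) (h : d < 10) :
    PySem.Int.ofChars? [Nat.digitChar d] = some (d : Int) := by
  interval_cases d <;> decide

theorem pvParse_digitChars (l : List Nat) (h : ∀ d ∈ l, d < 10) :
    pvParse (l.map Nat.digitChar) = some (l.map fun d : Nat => (d : Int)) := by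
  induction l with
  | nil => rfl
  | cons d ds ih =>
    unfold pvParse
    rw [List.map_cons, List.mapM_cons, pvOfChars_digitChar d (h d (List.mem_cons_self))]
    have := ih (fun x hx => h x (List.mem_cons_of_mem _ hx))
    unfold pvParse at this
    rw [this]
    rfl

theorem pvToDigitsCore_eq (n : Nat) (f : Nat) (acc : List Char) (h0 : 0 < n) (h : n < f) :
    Nat.toDigitsCore 10 f n acc = ((Nat.digits 10 n).map Nat.digitChar).reverse ++ acc := by
  induction n using Nat.strong_induction_on generalizing f acc with
  | _ n ih =>
    match f with
    | 0 => omega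
    | f + 1 =>
      rw [Nat.toDigitsCore]
      by_cases hd : n / 10 = 0
      · simp only [hd, if_true]
        rw [Nat.digits_def' (by norm_num) h0, hd, Nat.digits_zero]
        have : n % 10 = n := Nat.mod_eq_of_lt (by omega)
        simp [this]
      · simp only [hd, if_false]
        have hlt : n / 10 < n := Nat.div_lt_self h0 (by norm_num)
        rw [ih (n / 10) hlt f _ (Nat.pos_of_ne_zero hd) (by omega)]
        rw [Nat.digits_def' (by norm_num) h0]
        simp

theorem pvToChars_of_pos (m : Int) (h : 0 < m) :
    PySem.Int.toChars m = ((Nat.digits 10 m.toNat).map Nat.digitChar).reverse := by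
  unfold PySem.Int.toChars
  rw [if_neg (by omega)]
  rw [Nat.toDigits]
  rw [pvToDigitsCore_eq m.toNat (m.toNat + 1) [] (by omega) (by omega)]
  simp

def pvHd (m : Int) : Int :=
  (((Nat.digits 10 m.toNat).reverse.getD 0 0 + (Nat.digits 10 m.toNat).reverse.getD 1 0 +
      (Nat.digits 10 m.toNat).reverse.getD 2 0 : Nat) : Int) -
  (((Nat.digits 10 m.toNat).reverse.getD 3 0 + (Nat.digits 10 m.toNat).reverse.getD 4 0 +
      (Nat.digits 10 m.toNat).reverse.getD 5 0 : Nat) : Int)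

theorem pvParse_toChars (m : Int) (h : 0 < m) :
    pvParse (PySem.Int.toChars m) =
      some (((Nat.digits 10 m.toNat).reverse).map fun d : Nat => (d : Int)) := by
  rw [pvToChars_of_pos m h, ← List.map_reverse]
  exact pvParse_digitChars _ (fun d hd =>
    Nat.digits_lt_base (by norm_num) (List.mem_reverse.mp hd))

theorem pvSum2_none (num : List Int) (h : num.length ≤ 5) : pvSum2 num = none := by
  have hr2 : PySem.List.pyRange 3 6 1 = [3,4,5] := by decide
  have h5 : PySem.List.pyGet? num 5 = none := by
    rw [show (5 : Int) = ((5 : Nat) : Int) from rfl, PySem.List.pyGet?_natCast]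
    exact List.getElem?_eq_none (by omega)
  unfold pvSum2
  rw [hr2]
  simp only [List.foldl, h5]
  rcases (((some (0:Int)).bind fun a => (PySem.List.pyGet? num 3).map fun d => a + d).bind
      fun a => (PySem.List.pyGet? num 4).map fun d => a + d) with _ | x <;> rfl

theorem pvDiffA_none (m : Int) (h : m < 100000) : pvDiffA m = none := by
  rcases lt_trichotomy m 0 with hm | hm | hm
  · have : PySem.Int.toChars m = '-' :: Nat.toDigits 10 m.natAbs := by
      unfold PySem.Int.toChars; rw [if_pos hm]
    unfold pvDiffA
    rw [this]
    unfold pvParse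
    rw [List.mapM_cons]
    have : PySem.Int.ofChars? ['-'] = none := by decide
    simp [this]
  · subst hm; decide
  · unfold pvDiffA
    rw [pvParse_toChars m hm]
    have hlen : ((Nat.digits 10 m.toNat).reverse.map fun d : Nat => (d : Int)).length ≤ 5 := by
      rw [List.length_map, List.length_reverse]
      refine (Nat.digits_length_le_iff (b := 10) (by norm_num) m.toNat).mpr ?_
      have h10 : (10:ℕ)^5 = 100000 := by norm_num
      omega
    rw [Option.bind_some]  -- maybe `some _ |>.bind` reduces
    rw [pvSum2_none _ hlen]
    rcases pvSum1 ((Nat.digits 10 m.toNat).reverse.map fun d : Nat => (d : Int)) with _ | x <;> rfl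

theorem pvDiffA_some (m : Int) (h : 100000 ≤ m) : pvDiffA m = some (pvHd m) := by
  have hm : 0 < m := by omega
  set L := (Nat.digits 10 m.toNat).reverse with hL
  have hlen : 6 ≤ L.length := by
    rw [hL, List.length_reverse]
    by_contra hc
    have := (Nat.digits_length_le_iff (b := 10) (k := 5) (by norm_num) m.toNat).mp (by omega)
    have h10 : (10:ℕ)^5 = 100000 := by norm_num
    omega
  have hget : ∀ n : Nat, n < 6 → PySem.List.pyGet? (L.map fun d : Nat => (d : Int)) (n : Int)
      = some ((L.getD n 0 : Nat) : Int) := by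
    intro n hn
    have hnl : n < L.length := by omega
    rw [PySem.List.pyGet?_natCast]
    rw [List.getElem?_eq_getElem (by rw [List.length_map]; exact hnl)]
    rw [List.getElem_map, List.getD_eq_getElem L 0 hnl]
  have hr1 : PySem.List.pyRange 0 3 1 = [0,1,2] := by decide
  have hr2 : PySem.List.pyRange 3 6 1 = [3,4,5] := by decide
  have e0 := hget 0 (by norm_num); have e1 := hget 1 (by norm_num)
  have e2 := hget 2 (by norm_num); have e3 := hget 3 (by norm_num)
  have e4 := hget 4 (by norm_num); have e5 := hget 5 (by norm_num)
  simp only [Nat.cast_ofNat, Nat.cast_zero, Nat.cast_one] at e0 e1 e2 e3 e4 e5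
  unfold pvDiffA
  rw [pvParse_toChars m hm, Option.bind_some]
  unfold pvSum1 pvSum2
  rw [hr1, hr2, ← hL]
  simp only [List.foldl, e0, e1, e2, e3, e4, e5, Option.bind_some, Option.map_some,
    Option.some.injEq]
  unfold pvHd
  rw [← hL]
  push_cast
  ring

theorem pvHappyB_eq (m : Int) : pvHappyB m = (pvDiffA m).map (fun d => d == 0) := by
  unfold pvHappyB pvDiffA
  rcases pvParse (PySem.Int.toChars m) with _ | num
  · rfl
  · simp only [Option.bind_some]
    rw [pvBal_eq]

theorem pvHappy_ge (m : Int) (h : pvDiffA m = some 0) : 100000 ≤ m := by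
  by_contra hc
  rw [pvDiffA_none m (by omega)] at h
  simp at h

theorem pvExists_happy_above (n : Int) (h : 100000 ≤ n) :
    ∃ u : Int, n < u ∧ u ≤ n + (20 * n.natAbs : Nat) ∧ pvDiffA u = some 0 := by
  set N := n.toNat with hN
  set k := (Nat.digits 10 N).length with hk
  have hNn : (N : Int) = n := by omega
  have hk6 : 6 ≤ k := by
    rw [hk]
    by_contra hc
    have := (Nat.digits_length_le_iff (b := 10) (k := 5) (by norm_num) N).mp (by omega)
    have h10 : (10:ℕ)^5 = 100000 := by norm_num
    omega
  have hNlt : N < 10 ^ k := Nat.lt_base_pow_length_digits (by norm_num)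
  have hNge : 10 ^ (k - 1) ≤ N := by
    by_contra hc
    have := (Nat.digits_length_le_iff (b := 10) (k := k - 1) (by norm_num) N).mpr (by omega)
    omega
  set W : Nat := 10 ^ (k - 3) * 1001 with hW
  have hWdig : Nat.digits 10 W = List.replicate (k - 3) 0 ++ [1, 0, 0, 1] := by
    rw [hW, Nat.digits_base_pow_mul (by norm_num) (by norm_num),
      show Nat.digits 10 1001 = [1,0,0,1] from by decide]
  have hWge : 100000 ≤ W := by
    have : 10 ^ 3 ≤ 10 ^ (k - 3) := Nat.pow_le_pow_right (by norm_num) (by omega)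
    calc (100000 : ℕ) ≤ 10 ^ 3 * 1001 := by norm_num
    _ ≤ 10 ^ (k - 3) * 1001 := by exact Nat.mul_le_mul_right _ this
  have hgt : N < W := by
    calc N < 10 ^ k := hNlt
    _ = 10 ^ (k - 3) * 10 ^ 3 := by rw [← pow_add]; congr 1; omega
    _ ≤ 10 ^ (k - 3) * 1001 := Nat.mul_le_mul_left _ (by norm_num)
  have hle : W ≤ 11 * N := by
    have h1 : 10 ^ (k - 3) * 100 ≤ N := by
      calc 10 ^ (k - 3) * 100 = 10 ^ (k - 1) := by
            rw [show (100:ℕ) = 10 ^ 2 by norm_num, ← pow_add]; congr 1; omega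
      _ ≤ N := hNge
    calc W = 10 ^ (k - 3) * 1001 := hW
    _ ≤ 10 ^ (k - 3) * 1100 := Nat.mul_le_mul_left _ (by norm_num)
    _ = 11 * (10 ^ (k - 3) * 100) := by ring
    _ ≤ 11 * N := Nat.mul_le_mul_left _ h1
  refine ⟨(W : Int), by omega, by omega, ?_⟩
  rw [pvDiffA_some _ (by exact_mod_cast by omega)]
  have htN : ((W : Int)).toNat = W := by omega
  unfold pvHd
  rw [htN, hWdig]
  have hrep : (List.replicate (k - 3) 0 ++ [1, 0, 0, 1]).reverse
      = [1, 0, 0, 1] ++ List.replicate (k - 3) (0:ℕ) := by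
    rw [List.reverse_append, List.reverse_replicate]
    rfl
  rw [hrep]
  have hgd : ∀ i : Nat, 4 ≤ i → i < 4 + (k - 3) →
      (([1, 0, 0, 1] ++ List.replicate (k - 3) (0:ℕ)).getD i 0) = 0 := by
    intro i h4 hi
    rw [List.getD_eq_getElem _ _ (by simp [List.length_replicate]; omega)]
    rw [List.getElem_append_right (by simpa using h4)]
    simp [List.getElem_replicate]
  have g4 := hgd 4 (by omega) (by omega)
  have g5 := hgd 5 (by omega) (by omega)
  rw [g4, g5]
  norm_num

theorem pvUpA_eq (F : Nat) (t u : Int) (ht : 100000 ≤ t) (hu : pvDiffA u = some 0)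
    (h1 : t < u) (h2 : u ≤ t + F) (hmin : ∀ m, t < m → m < u → pvDiffA m ≠ some 0) :
    pvUpA t F = some u := by
  induction F generalizing t with
  | zero => omega
  | succ f ih =>
    rw [pvUpA]
    rcases eq_or_lt_of_le (show t + 1 ≤ u by omega) with he | hlt
    · rw [← he] at hu
      simp only [hu]
      rw [if_pos trivial, he]
    · obtain ⟨d, hd⟩ : ∃ d, pvDiffA (t + 1) = some d := ⟨_, pvDiffA_some _ (by omega)⟩
      simp only [hd]
      have hne : d ≠ 0 := fun h0 => hmin (t + 1) (by omega) hlt (h0 ▸ hd)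
      rw [if_neg hne]
      exact ih (t + 1) (by omega) (by omega) (by omega)
        (fun m hm1 hm2 => hmin m (by omega) hm2)

theorem pvDownA_eq (s : String) (hs : s ≠ "100000") (F : Nat) (t w : Int)
    (hw : pvDiffA w = some 0) (h1 : w < t) (h2 : t ≤ w + F)
    (hmin : ∀ m, w < m → m < t → pvDiffA m ≠ some 0) :
    pvDownA s t F = some (Sum.inr w) := by
  have hw1 : 100000 ≤ w := pvHappy_ge w hw
  induction F generalizing t with
  | zero => omega
  | succ f ih =>
    rw [pvDownA, if_neg hs]
    rcases eq_or_lt_of_le (show w ≤ t - 1 by omega) with he | hlt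
    · rw [he] at hw
      simp only [hw]
      rw [if_pos trivial, ← he]
    · obtain ⟨d, hd⟩ : ∃ d, pvDiffA (t - 1) = some d := ⟨_, pvDiffA_some _ (by omega)⟩
      simp only [hd]
      have hne : d ≠ 0 := fun h0 => hmin (t - 1) hlt (by omega) (h0 ▸ hd)
      rw [if_neg hne]
      exact ih (t - 1) hlt (by omega) (fun m hm1 hm2 => hmin m hm1 (by omega))

theorem pvExpandB_eq (n u w : Int) (hu : pvDiffA u = some 0) (hw : pvDiffA w = some 0)
    (_h1 : n < u) (h2 : w < n)
    (hminu : ∀ m, n < m → m < u → pvDiffA m ≠ some 0)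
    (hminw : ∀ m, w < m → m < n → pvDiffA m ≠ some 0) :
    ∀ (F : Nat) (d : Int), 1 ≤ d → d ≤ min (u - n) (n - w) →
      (min (u - n) (n - w) - d).toNat < F →
      pvExpandB n d F = (if u - n ≤ n - w then PySem.Int.toStr u else PySem.Int.toStr w) := by
  have hw1 : 100000 ≤ w := pvHappy_ge w hw
  intro F
  induction F with
  | zero => intro d hd1 hd2 hd3; omega
  | succ f ih =>
    intro d hd1 hd2 hd3
    rw [pvExpandB]
    obtain ⟨dp, hdp⟩ : ∃ x, pvDiffA (n + d) = some x := ⟨_, pvDiffA_some _ (by omega)⟩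
    rcases eq_or_ne dp 0 with hz | hz
    · -- n + d is happy, so n + d = u and the upper one wins
      subst hz
      have hnd : n + d = u := by
        rcases lt_trichotomy (n + d) u with hlt | he | hgt
        · exact absurd hdp (hminu (n + d) (by omega) hlt)
        · exact he
        · omega
      rw [pvHappyB_eq, hdp]
      simp only [Option.map_some, beq_self_eq_true]
      rw [hnd, if_pos (by omega)]
    · -- n + d not happy, hence d < u - n
      have hdu : d < u - n := by
        rcases eq_or_lt_of_le (show d ≤ u - n by omega) with he | hlt
        · exfalso; apply hz; have : n + d = u := by omega
          rw [this] at hdp; rw [hdp] at hu; exact (Option.some.injEq _ _).mp hu.symm |>.symm ▸ rfl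
        · omega
      rw [pvHappyB_eq, hdp]
      have hzb : (dp == 0) = false := by simp [hz]
      simp only [Option.map_some, hzb]
      obtain ⟨dm, hdm⟩ : ∃ x, pvDiffA (n - d) = some x := ⟨_, pvDiffA_some _ (by omega)⟩
      rcases eq_or_ne dm 0 with hz2 | hz2
      · subst hz2
        have hnd : n - d = w := by
          rcases lt_trichotomy (n - d) w with hlt | he | hgt
          · omega
          · exact he
          · exact absurd hdm (hminw (n - d) hgt (by omega))
        rw [pvHappyB_eq, hdm]
        simp only [Option.map_some, beq_self_eq_true]
        rw [hnd, if_neg (by omega)]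
      · have hdw : d < n - w := by
          rcases eq_or_lt_of_le (show d ≤ n - w by omega) with he | hlt
          · exfalso; apply hz2; have : n - d = w := by omega
            rw [this] at hdm; rw [hdm] at hw; exact (Option.some.injEq _ _).mp hw.symm |>.symm ▸ rfl
          · omega
        rw [pvHappyB_eq, hdm]
        have hzb2 : (dm == 0) = false := by simp [hz2]
        simp only [Option.map_some, hzb2]
        exact ih (d + 1) (by omega) (by omega) (by omega)

theorem pvChain_eq (num : List Int) (h : 6 ≤ num.length) :
    (pvSum1 num).bind (fun s1 => (pvSum2 num).map fun s2 => s1 - s2)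
      = some ((num.getD 0 0 + num.getD 1 0 + num.getD 2 0)
            - (num.getD 3 0 + num.getD 4 0 + num.getD 5 0)) := by
  have hget : ∀ i : Nat, i < 6 → PySem.List.pyGet? num (i : Int) = some (num.getD i 0) := by
    intro i hi
    rw [PySem.List.pyGet?_natCast, List.getElem?_eq_getElem (by omega),
      List.getD_eq_getElem num 0 (by omega)]
  have hr1 : PySem.List.pyRange 0 3 1 = [0,1,2] := by decide
  have hr2 : PySem.List.pyRange 3 6 1 = [3,4,5] := by decide
  have e0 := hget 0 (by norm_num); have e1 := hget 1 (by norm_num)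
  have e2 := hget 2 (by norm_num); have e3 := hget 3 (by norm_num)
  have e4 := hget 4 (by norm_num); have e5 := hget 5 (by norm_num)
  simp only [Nat.cast_ofNat, Nat.cast_zero, Nat.cast_one] at e0 e1 e2 e3 e4 e5
  unfold pvSum1 pvSum2
  rw [hr1, hr2]
  simp only [List.foldl, e0, e1, e2, e3, e4, e5, Option.bind_some, Option.map_some,
    Option.some.injEq]
  ring

theorem pv100000_A : get_nearest_happy_ticket "100000" = "100001" := by
  have hp : pvParse ("100000".toList) = some [1,0,0,0,0,0] := by decide
  have hchain : (pvSum1 [1,0,0,0,0,0]).bind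
      (fun s1 => (pvSum2 [1,0,0,0,0,0]).map (fun s2 => s1 - s2)) = some 1 := by decide
  have hof : PySem.Int.ofStr? "100000" = some 100000 := by decide
  have hup : pvUpA 100000 (pvFuel 100000) = some 100001 := by
    apply pvUpA_eq _ _ _ (by norm_num) (by decide) (by norm_num)
    · have : pvFuel 100000 = 3000000 := by norm_num [pvFuel]
      rw [this]; norm_num
    · intro m h1 h2; omega
  have hdown : pvDownA "100000" 100000 (pvFuel 100000) = some (Sum.inl "100001") := by
    have : pvFuel 100000 = 2999999 + 1 := by norm_num [pvFuel]
    rw [this, pvDownA, if_pos rfl]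
  unfold get_nearest_happy_ticket
  rw [hp]
  simp only [hchain]
  rw [if_neg (by norm_num), hof]
  simp only [hup, hdown]

theorem pv100000_B : get_nearest_happy_ticket_alt "100000" = "100001" := by
  have hp : pvParse ("100000".toList) = some [1,0,0,0,0,0] := by decide
  have hbal : pvBal [1,0,0,0,0,0] = some false := by decide
  have hof : PySem.Int.ofStr? "100000" = some 100000 := by decide
  have hexp : pvExpandB 100000 1 (pvFuel 100000) = "100001" := by
    have : pvFuel 100000 = 2999999 + 1 := by norm_num [pvFuel]
    rw [this, pvExpandB]
    have h1 : pvHappyB (100000 + 1) = some true := by decide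
    rw [h1]
    decide
  unfold get_nearest_happy_ticket_alt
  rw [hp]
  simp only [hbal, hof, hexp]

theorem pvMain (s : String) (hpre : Pre_get_nearest_happy_ticket s) :
    get_nearest_happy_ticket s = get_nearest_happy_ticket_alt s := by
  obtain ⟨hdig, hlen, hdisj⟩ := hpre
  by_cases hs : s = "100000"
  · rw [hs, pv100000_A, pv100000_B]
  obtain ⟨a, b, c, d, e, fc, r, hl⟩ : ∃ a b c d e fc r, s.toList = a::b::c::d::e::fc::r := by
    rcases hLc : s.toList with _|⟨a,_|⟨b,_|⟨c,_|⟨d,_|⟨e,_|⟨fc,r⟩⟩⟩⟩⟩⟩ <;>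
      first
        | exact ⟨a,b,c,d,e,fc,r, rfl⟩
        | (exfalso; rw [hLc] at hlen; simp at hlen)
  have hdig' : ∀ x ∈ s.toList, x.isDigit = true := fun x hx => List.all_eq_true.mp hdig x hx
  have hp : pvParse s.toList = some (s.toList.map fun x => (x.toNat : Int) - 48) :=
    pvParse_digits _ hdig'
  have hlnum : 6 ≤ (s.toList.map fun x => (x.toNat : Int) - 48).length := by
    rw [List.length_map]; exact hlen
  have hchain := pvChain_eq _ hlnum
  set D := ((s.toList.map fun x => (x.toNat : Int) - 48).getD 0 0 +
      (s.toList.map fun x => (x.toNat : Int) - 48).getD 1 0 +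
      (s.toList.map fun x => (x.toNat : Int) - 48).getD 2 0) -
     ((s.toList.map fun x => (x.toNat : Int) - 48).getD 3 0 +
      (s.toList.map fun x => (x.toNat : Int) - 48).getD 4 0 +
      (s.toList.map fun x => (x.toNat : Int) - 48).getD 5 0) with hD
  have hDval : D = (((a.toNat : Int) - 48) + ((b.toNat : Int) - 48) + ((c.toNat : Int) - 48))
      - (((d.toNat : Int) - 48) + ((e.toNat : Int) - 48) + ((fc.toNat : Int) - 48)) := by
    rw [hD, hl]
    simp [List.getD]
  unfold get_nearest_happy_ticket get_nearest_happy_ticket_alt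
  rw [hp]
  simp only [hchain, pvBal_eq, Option.map_some]
  by_cases hz : D = 0
  · rw [if_pos hz]
    have : (D == 0) = true := by simp [hz]
    rw [this]
  · rw [if_neg hz]
    have hzb : (D == 0) = false := by simp [hz]
    rw [hzb]
    rcases hof : PySem.Int.ofStr? s with _ | n
    · rfl
    · -- resolve the disjunction: the value is at least 100002
      have hval : 100002 ≤ n := by
        rcases hdisj with hq | hq | hq
        · exfalso; apply hz
          rw [hl] at hq
          unfold pvCodeSum at hq
          simp at hq
          rw [hDval]; omega
        · exact absurd hq hs
        · rw [hof] at hq; simpa using hq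
      have hFn : (pvFuel n : Int) = 20 * n + 1000000 := by
        unfold pvFuel; omega
      -- least happy ticket above n
      obtain ⟨u, hu, hun, huB, hminu⟩ :
          ∃ u, pvDiffA u = some 0 ∧ n < u ∧ u ≤ n + (20 * n.natAbs : Nat) ∧
            ∀ m, n < m → m < u → pvDiffA m ≠ some 0 := by
        obtain ⟨u0, hu01, hu02, hu03⟩ := pvExists_happy_above n (by omega)
        have hexU : ∃ k : Nat, pvDiffA (n + 1 + (k : Int)) = some 0 := by
          refine ⟨(u0 - n - 1).toNat, ?_⟩
          have : n + 1 + ((u0 - n - 1).toNat : Int) = u0 := by omega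
          rw [this]; exact hu03
        refine ⟨n + 1 + (Nat.find hexU : Int), Nat.find_spec hexU, by omega, ?_, ?_⟩
        · have := Nat.find_min' hexU (m := (u0 - n - 1).toNat) (by
            have : n + 1 + ((u0 - n - 1).toNat : Int) = u0 := by omega
            rw [this]; exact hu03)
          omega
        · intro m hm1 hm2 hmh
          have hk : (m - n - 1).toNat < Nat.find hexU := by omega
          apply Nat.find_min hexU hk
          have : n + 1 + ((m - n - 1).toNat : Int) = m := by omega
          rw [this]; exact hmh
      -- greatest happy ticket below n
      obtain ⟨w, hw, hwn, hwB, hminw⟩ :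
          ∃ w, pvDiffA w = some 0 ∧ w < n ∧ 100001 ≤ w ∧
            ∀ m, w < m → m < n → pvDiffA m ≠ some 0 := by
        have hexW : ∃ k : Nat, pvDiffA (n - 1 - (k : Int)) = some 0 := by
          refine ⟨(n - 1 - 100001).toNat, ?_⟩
          have : n - 1 - ((n - 1 - 100001).toNat : Int) = 100001 := by omega
          rw [this]; decide
        have hkb : (Nat.find hexW : Int) ≤ n - 1 - 100001 := by
          have := Nat.find_min' hexW (m := (n - 1 - 100001).toNat) (by
            have : n - 1 - ((n - 1 - 100001).toNat : Int) = 100001 := by omega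
            rw [this]; decide)
          omega
        have hwsp := Nat.find_spec hexW
        have h100 : 100000 ≤ n - 1 - (Nat.find hexW : Int) := pvHappy_ge _ hwsp
        refine ⟨n - 1 - (Nat.find hexW : Int), hwsp, by omega, ?_, ?_⟩
        · rcases eq_or_lt_of_le h100 with heq | hlt
          · exfalso
            have h1 : pvDiffA (100000 : Int) = some 1 := by decide
            rw [heq] at h1
            rw [hwsp] at h1
            simp at h1
          · omega
        · intro m hm1 hm2 hmh
          have hk : (n - 1 - m).toNat < Nat.find hexW := by omega
          apply Nat.find_min hexW hk
          have : n - 1 - ((n - 1 - m).toNat : Int) = m := by omega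
          rw [this]; exact hmh
      -- rewrite both sides
      have hup : pvUpA n (pvFuel n) = some u :=
        pvUpA_eq (pvFuel n) n u (by omega) hu hun (by omega) hminu
      have hdown : pvDownA s n (pvFuel n) = some (Sum.inr w) :=
        pvDownA_eq s hs (pvFuel n) n w hw hwn (by omega) hminw
      have hexp : pvExpandB n 1 (pvFuel n) =
          (if u - n ≤ n - w then PySem.Int.toStr u else PySem.Int.toStr w) :=
        pvExpandB_eq n u w hu hw hun hwn hminu hminw (pvFuel n) 1 (by omega)
          (by omega) (by omega)
      show (match pvUpA n (pvFuel n) with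
        | none => ""
        | some up =>
          match pvDownA s n (pvFuel n) with
          | none => ""
          | some (Sum.inl r) => r
          | some (Sum.inr down) =>
            if (n - up).natAbs > (n - down).natAbs then PySem.Int.toStr down
            else PySem.Int.toStr up)
          = pvExpandB n 1 (pvFuel n)
      generalize hFg : pvFuel n = F at hup hdown hexp ⊢
      rw [hup, hdown, hexp]
      show (if (n - u).natAbs > (n - w).natAbs then PySem.Int.toStr w else PySem.Int.toStr u)
          = (if u - n ≤ n - w then PySem.Int.toStr u else PySem.Int.toStr w)
      by_cases hcmp : u - n ≤ n - w
      · rw [if_pos hcmp, if_neg (by omega)]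
      · rw [if_neg hcmp, if_pos (by omega)]
-- ===== VERDICT (by name: the statement is the Claim_ definition above) =====
theorem get_nearest_happy_ticket_spec : Claim_equal_get_nearest_happy_ticket := by
  intro current_ticket _hdom hpre
  unfold Spec_get_nearest_happy_ticket
  exact pvMain current_ticket hpre
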